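-- pv_equiv track=rewrite | github.com/bartlomiejcwiklak/UniversityWork | object_oriented_programming_in_c/programiki/task04/main.py | indel_distance
-- ===== SOURCE A (Python) =====
-- def indel_distance(s, t):
--     # allows only for insertions & deletions (substitutions count as del+ins).
--     m, n = len(s), len(t)
--     dp = [[0]*(n+1) for _ in range(m+1)]
--     for i in range(m+1): dp[i][0] = i
--     for j in range(n+1): dp[0][j] = j
--     for i in range(1, m+1):
--         for j in range(1, n+1):
--             if s[i-1] == t[j-1]:
--                 dp[i][j] = dp[i-1][j-1]
--             else:
--                 # deletion or insertion
--                 dp[i][j] = min(dp[i-1][j] + 1,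
--                                dp[i][j-1] + 1)
--     return dp[m][n]
-- ===== SOURCE B (Python) =====
-- def indel_distance(s, t):
--     # LCS-based: indel distance = len(s) + len(t) - 2*LCS(s, t).
--     prev = [0] * (len(t) + 1)
--     for c in s:
--         cur = [0]
--         for diag, up, ch in zip(prev, prev[1:], t):
--             cur.append(diag + 1 if c == ch else max(up, cur[-1]))
--         prev = cur
--     return len(s) + len(t) - 2 * prev[-1]
-- ===== Notes on version B (the rewrite author's own statement) =====
-- stated objective: alternative
-- what changed: B computes the longest-common-subsequence length with a zero-initialized max-based DP kept as a single rolling row built by zipping the previous row with itself and t, and returns m+n-2*LCS, instead of A's min-based indel-distance table with i/j-initialized borders.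
import Mathlib
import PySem

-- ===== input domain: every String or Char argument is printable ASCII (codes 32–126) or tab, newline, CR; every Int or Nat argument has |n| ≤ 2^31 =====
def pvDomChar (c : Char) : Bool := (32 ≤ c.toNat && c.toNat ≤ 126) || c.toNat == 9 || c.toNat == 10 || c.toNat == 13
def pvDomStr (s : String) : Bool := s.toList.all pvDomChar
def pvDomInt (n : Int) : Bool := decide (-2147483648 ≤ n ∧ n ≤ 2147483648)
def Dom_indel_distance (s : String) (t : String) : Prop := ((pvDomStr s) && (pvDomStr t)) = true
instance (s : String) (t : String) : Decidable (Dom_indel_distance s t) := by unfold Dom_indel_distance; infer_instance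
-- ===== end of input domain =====

-- B replaces A's min-based indel DP (borders initialized to i and j) by a zero-initialized,
-- max-based single rolling LCS row built by zipping the previous row with its own tail and t,
-- returning m + n - 2*LCS (objective: alternative).

-- ===== PORT A =====
-- Python A fills dp row by row, left to right, each row depending only on the previous row;
-- the port carries the previous row `prev` and the row index through the same i/j loops.
-- inner loop `for j in range(1, n+1)`: cell = dp[i-1][j-1] if chars equal else min(dp[i-1][j]+1, dp[i][j-1]+1)
def pvRowA (c : Char) : List Char → List Int → Int → List Int
  | d :: ds, p0 :: p1 :: ps, left =>
      let v := if c == d then p0 else min (p1 + 1) (left + 1)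
      v :: pvRowA c ds (p1 :: ps) v
  | _, _, _ => []

-- outer loop `for i in range(1, m+1)`: row i starts with dp[i][0] = i
def pvLoopA (t : List Char) : List Char → List Int → Int → List Int
  | [], prev, _ => prev
  | c :: cs, prev, i => pvLoopA t cs ((i + 1) :: pvRowA c t prev (i + 1)) (i + 1)

def indel_distance (s : String) (t : String) : Int :=
  let sc := s.toList
  let tc := t.toList
  -- dp[0][j] = j for j in range(n+1)
  let row0 : List Int := (List.range (tc.length + 1)).map (fun j => (j : Int))
  (pvLoopA tc sc row0 0).getLastD 0   -- dp[m][n]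

-- ===== PORT B =====
-- inner loop of Source B: `for diag, up, ch in zip(prev, prev[1:], t): cur.append(diag+1 if c == ch
-- else max(up, cur[-1]))`.  The new row is accumulated front-first (so `cur[-1]` is the head of
-- the accumulator; `cur` starts as [0], so it is never empty and headD 0 is exact) and reversed
-- at the end; `prev[1:]` on a list of ints is exactly `drop 1`.
def pvNextRow (c : Char) (tc : List Char) (prev : List Int) : List Int :=
  ((prev.zip ((prev.drop 1).zip tc)).foldl
    (fun acc x => (if c == x.2.2 then x.1 + 1 else max x.2.1 (acc.headD 0)) :: acc) [0]).reverse

def indel_distance_alt (s : String) (t : String) : Int :=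
  let tc := t.toList
  -- prev = [0]*(len(t)+1); for c in s: prev = next row; prev[-1] (row always nonempty)
  let final := s.toList.foldl (fun prev c => pvNextRow c tc prev) (List.replicate (tc.length + 1) 0)
  (s.toList.length : Int) + (tc.length : Int) - 2 * final.getLastD 0

-- ===== PRECONDITION & SPEC =====
def Spec_indel_distance (s : String) (t : String) (out : Int) : Prop := out = indel_distance_alt s t
instance (s : String) (t : String) (out : Int) : Decidable (Spec_indel_distance s t out) := by unfold Spec_indel_distance; infer_instance

-- ===== CLAIM (what is proved, stated in full; the proofs are below) =====
def Claim_equal_indel_distance : Prop := ∀ (s : String) (t : String), Dom_indel_distance s t → Spec_indel_distance s t (indel_distance s t)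

-- ===== LEMMAS AND PROOFS =====

-- a recursive description of B's zipped row fold (proof-only)
def rowSpec (c : Char) : List Char → List Int → Int → List Int
  | d :: ds, p0 :: p1 :: ps, left =>
      let v := if c == d then p0 + 1 else max p1 left
      v :: rowSpec c ds (p1 :: ps) v
  | _, _, _ => []

-- the same, on the zipped triples, consumed front-first
def buildB (c : Char) : List (Int × Int × Char) → Int → List Int
  | [], _ => []
  | x :: xs, left =>
      let v := if c == x.2.2 then x.1 + 1 else max x.2.1 left
      v :: buildB c xs v

theorem foldl_push_rev (c : Char) :
    ∀ (trips : List (Int × Int × Char)) (acc : List Int),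
      trips.foldl (fun a x => (if c == x.2.2 then x.1 + 1 else max x.2.1 (a.headD 0)) :: a) acc
        = (buildB c trips (acc.headD 0)).reverse ++ acc := by
  intro trips
  induction trips with
  | nil => intro acc; simp [buildB]
  | cons x xs ih =>
    intro acc
    simp only [List.foldl_cons, buildB, List.reverse_cons, List.append_assoc]
    rw [ih]
    simp

theorem buildB_zip (c : Char) :
    ∀ (ds : List Char) (prev : List Int) (left : Int),
      buildB c (prev.zip (prev.tail.zip ds)) left = rowSpec c ds prev left := by
  intro ds
  induction ds with
  | nil =>
    intro prev left
    cases prev with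
    | nil => simp [buildB, rowSpec]
    | cons p0 pr => simp [buildB, rowSpec]
  | cons d ds ih =>
    intro prev left
    match prev with
    | [] => simp [buildB, rowSpec]
    | [p0] => simp [buildB, rowSpec]
    | p0 :: p1 :: ps =>
      simp only [List.tail_cons, List.zip_cons_cons, buildB, rowSpec]
      exact congrArg _ (ih (p1 :: ps) _)

theorem nextRow_eq (c : Char) (tc : List Char) (prev : List Int) :
    pvNextRow c tc prev = 0 :: rowSpec c tc prev 0 := by
  unfold pvNextRow
  rw [foldl_push_rev]
  simp [List.drop_one, buildB_zip]

-- a recursive description of B's outer fold (proof-only)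
def loopSpec (t : List Char) : List Char → List Int → List Int
  | [], prev => prev
  | c :: cs, prev => loopSpec t cs (0 :: rowSpec c t prev 0)

theorem foldl_loop_eq (tc : List Char) :
    ∀ (cs : List Char) (prev : List Int),
      cs.foldl (fun prev c => pvNextRow c tc prev) prev = loopSpec tc cs prev := by
  intro cs
  induction cs with
  | nil => intro prev; simp [loopSpec]
  | cons c cs ih =>
    intro prev
    rw [List.foldl_cons]
    simp only [loopSpec, ← nextRow_eq]
    exact ih _

-- the invariant: A's row i, from column k on, equals (i + j - 2 * B's row i) pointwise
def RelFrom (i : Int) : List Int → List Int → Int → Prop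
  | [], [], _ => True
  | a :: as, b :: bs, k => a = i + k - 2 * b ∧ RelFrom i as bs (k + 1)
  | _, _, _ => False

theorem relFrom_row (c : Char) :
    ∀ (ds : List Char) (pA pB : List Int) (k leftA leftB i : Int),
      RelFrom i pA pB k → leftA = (i + 1) + k - 2 * leftB →
      RelFrom (i + 1) (pvRowA c ds pA leftA) (rowSpec c ds pB leftB) (k + 1) := by
  intro ds
  induction ds with
  | nil => intro pA pB k lA lB i h hl; simp [pvRowA, rowSpec, RelFrom]
  | cons d ds ih =>
    intro pA pB k lA lB i h hl
    cases pA with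
    | nil =>
      cases pB with
      | nil => simp [pvRowA, rowSpec, RelFrom]
      | cons b bs => exact absurd h (by simp [RelFrom])
    | cons p0 pr =>
      cases pB with
      | nil => exact absurd h (by simp [RelFrom])
      | cons q0 qr =>
        obtain ⟨h0, hrest⟩ := h
        cases pr with
        | nil =>
          cases qr with
          | nil => simp [pvRowA, rowSpec, RelFrom]
          | cons q1 qs => exact absurd hrest (by simp [RelFrom])
        | cons p1 ps =>
          cases qr with
          | nil => exact absurd hrest (by simp [RelFrom])
          | cons q1 qs =>
            have h1 : p1 = i + (k + 1) - 2 * q1 := hrest.1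
            simp only [pvRowA, rowSpec]
            by_cases hc : (c == d) = true
            · simp only [if_pos hc]
              exact ⟨by omega, ih (p1 :: ps) (q1 :: qs) (k + 1) p0 (q0 + 1) i hrest (by omega)⟩
            · simp only [if_neg hc]
              exact ⟨by omega,
                ih (p1 :: ps) (q1 :: qs) (k + 1) (min (p1 + 1) (lA + 1)) (max q1 lB) i hrest
                  (by omega)⟩

theorem relFrom_loop (t : List Char) :
    ∀ (cs : List Char) (pA pB : List Int) (i : Int),
      RelFrom i pA pB 0 →
      RelFrom (i + cs.length) (pvLoopA t cs pA i) (loopSpec t cs pB) 0 := by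
  intro cs
  induction cs with
  | nil => intro pA pB i h; simpa [pvLoopA, loopSpec] using h
  | cons c cs ih =>
    intro pA pB i h
    simp only [pvLoopA, loopSpec]
    have hstep : RelFrom (i + 1) ((i + 1) :: pvRowA c t pA (i + 1)) (0 :: rowSpec c t pB 0) 0 :=
      ⟨by omega, by
        have := relFrom_row c t pA pB 0 (i + 1) 0 i h (by omega)
        simpa using this⟩
    have hrec := ih _ _ _ hstep
    have hcast : i + ((c :: cs).length : Int) = (i + 1) + (cs.length : Int) := by
      push_cast [List.length_cons]; ring
    rw [hcast]
    exact hrec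

theorem relFrom_init : ∀ (n k : Nat),
    RelFrom 0 ((List.range' k n).map (fun j => (j : Int))) (List.replicate n 0) (k : Int) := by
  intro n
  induction n with
  | zero => intro k; simp [RelFrom]
  | succ n ih =>
    intro k
    rw [List.range'_succ]
    refine ⟨by simp, ?_⟩
    have := ih (k + 1)
    have hcast : ((k + 1 : Nat) : Int) = (k : Int) + 1 := by push_cast; ring
    rwa [hcast] at this

theorem relFrom_getLastD :
    ∀ (ra rb : List Int) (i k : Int), RelFrom i ra rb k → ra ≠ [] →
      ra.getLastD 0 = i + (k + (ra.length : Int) - 1) - 2 * rb.getLastD 0 := by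
  intro ra
  induction ra with
  | nil => intro rb i k h hne; exact absurd rfl hne
  | cons a as ih =>
    intro rb i k h _
    cases rb with
    | nil => exact absurd h (by simp [RelFrom])
    | cons b bs =>
      obtain ⟨h0, hrest⟩ := h
      cases as with
      | nil =>
        cases bs with
        | nil => simp only [List.getLastD_cons, List.getLastD_nil, List.length_cons,
            List.length_nil]; push_cast; omega
        | cons b2 bs2 => exact absurd hrest (by simp [RelFrom])
      | cons a2 as2 =>
        cases bs with
        | nil => exact absurd hrest (by simp [RelFrom])
        | cons b2 bs2 =>
          have hr := ih (b2 :: bs2) i (k + 1) hrest (by simp)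
          have e1 : (a :: a2 :: as2).getLastD 0 = (a2 :: as2).getLastD 0 := by simp
          have e2 : (b :: b2 :: bs2).getLastD 0 = (b2 :: bs2).getLastD 0 := by simp
          rw [e1, e2, hr]
          simp only [List.length_cons]
          push_cast
          ring

theorem rowA_length (c : Char) :
    ∀ (ds : List Char) (pA : List Int) (left : Int),
      pA.length = ds.length + 1 → (pvRowA c ds pA left).length = ds.length := by
  intro ds
  induction ds with
  | nil => intro pA left h; simp [pvRowA]
  | cons d ds ih =>
    intro pA left h
    match pA, h with
    | p0 :: p1 :: ps, h =>
      simp only [pvRowA, List.length_cons]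
      rw [ih (p1 :: ps) _ (by simpa using h)]

theorem loopA_length (t : List Char) :
    ∀ (cs : List Char) (pA : List Int) (i : Int),
      pA.length = t.length + 1 → (pvLoopA t cs pA i).length = t.length + 1 := by
  intro cs
  induction cs with
  | nil => intro pA i h; simpa [pvLoopA] using h
  | cons c cs ih =>
    intro pA i h
    simp only [pvLoopA]
    exact ih _ _ (by simp [rowA_length c t pA _ h])

-- ===== VERDICT (by name: the statement is the Claim_ definition above) =====
theorem indel_distance_spec : Claim_equal_indel_distance := by
  intro s t _
  unfold Spec_indel_distance indel_distance indel_distance_alt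
  simp only [foldl_loop_eq]
  have hinit : RelFrom 0
      ((List.range (t.toList.length + 1)).map (fun j => (j : Int)))
      (List.replicate (t.toList.length + 1) 0) 0 := by
    have := relFrom_init (t.toList.length + 1) 0
    simpa [List.range_eq_range'] using this
  have hloop := relFrom_loop t.toList s.toList _ _ 0 hinit
  have hlenA : (pvLoopA t.toList s.toList
      ((List.range (t.toList.length + 1)).map (fun j => (j : Int))) 0).length
      = t.toList.length + 1 :=
    loopA_length t.toList s.toList _ 0 (by simp)
  have hne : pvLoopA t.toList s.toList
      ((List.range (t.toList.length + 1)).map (fun j => (j : Int))) 0 ≠ [] := by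
    intro hnil; rw [hnil] at hlenA; simp at hlenA
  have hlast := relFrom_getLastD _ _ _ _ hloop hne
  rw [hlast, hlenA]
  push_cast
  ring
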